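-- pv_equiv track=rewrite | github.com/reills/bach | scripts/train_v1.py | _extend_vocab
-- ===== SOURCE A (Python) =====
-- from typing import Dict, Iterable, List, Optional
--
-- def _extend_vocab(vocab: Dict[str, int], tokens: Iterable[str]) -> List[str]:
--     added = []
--     next_id = max(vocab.values(), default=-1) + 1
--     for token in tokens:
--         if token in vocab:
--             continue
--         vocab[token] = next_id
--         next_id += 1
--         added.append(token)
--     return added
-- ===== SOURCE B (Python) =====
-- def _extend_vocab(vocab, tokens):
--     # Different algorithm: drop known tokens, compute each distinct token's first
--     # position by a backward overwrite pass, then sort those positions to recover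
--     # first-occurrence order; ids are attached in a separate pass at the end.
--     ts = [t for t in tokens if t not in vocab]
--     first = {}
--     for i, t in reversed(list(enumerate(ts))):
--         first[t] = i
--     added = [t for t, _ in sorted(first.items(), key=lambda kv: kv[1])]
--     base = max(vocab.values(), default=-1) + 1
--     for j, t in enumerate(added):
--         vocab[t] = base + j
--     return added
-- ===== Notes on version B (the rewrite author's own statement) =====
-- stated objective: alternative
-- what changed: Instead of A's single forward loop with a membership test that mutates the dict while scanning, B filters out known tokens, computes each distinct token's first position by a backward overwriting pass over the reversed enumeration, recovers first-occurrence order by sorting those positions, and assigns ids in a separate final pass.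
import Mathlib
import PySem

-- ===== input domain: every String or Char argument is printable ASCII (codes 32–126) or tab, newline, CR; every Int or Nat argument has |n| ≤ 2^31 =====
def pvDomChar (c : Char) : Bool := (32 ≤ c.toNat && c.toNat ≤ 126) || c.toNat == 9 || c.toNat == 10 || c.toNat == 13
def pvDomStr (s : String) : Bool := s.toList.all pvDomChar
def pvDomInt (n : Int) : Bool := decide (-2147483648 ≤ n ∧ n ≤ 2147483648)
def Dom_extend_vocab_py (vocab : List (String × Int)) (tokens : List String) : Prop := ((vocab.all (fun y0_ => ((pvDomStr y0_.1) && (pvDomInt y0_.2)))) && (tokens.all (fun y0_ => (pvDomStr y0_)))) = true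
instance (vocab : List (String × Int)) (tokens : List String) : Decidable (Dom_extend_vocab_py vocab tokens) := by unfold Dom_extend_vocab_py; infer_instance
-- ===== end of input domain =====

-- B replaces A's forward membership-test loop by a different algorithm: filter known tokens, find each
-- distinct token's first position by a backward overwriting pass, and sort those positions to recover
-- first-occurrence order; both Pythons mutate `vocab` identically, the equivalence proved is about the RETURN value.

-- ===== PORT A =====
def extend_vocab_py (vocab : List (String × Int)) (tokens : List String) : List String :=
  let d : PySem.Dict String Int := PySem.Dict.mk vocab
  -- next_id = max(vocab.values(), default=-1) + 1
  let next_id : Int := PySem.List.maxD d.values (fun v => v) (-1) + 1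
  -- for token in tokens: if token in vocab: continue; vocab[token]=next_id; next_id+=1; added.append(token)
  (tokens.foldl
    (fun (st : PySem.Dict String Int × Int × List String) token =>
      if st.1.contains token then st
      else (st.1.insert token st.2.1, st.2.1 + 1, st.2.2 ++ [token]))
    (d, next_id, [])).2.2

-- ===== PORT B =====
def extend_vocab_py_alt (vocab : List (String × Int)) (tokens : List String) : List String :=
  let d : PySem.Dict String Int := PySem.Dict.mk vocab
  -- ts = [t for t in tokens if t not in vocab]
  let ts := tokens.filter (fun t => !(d.contains t))
  -- for i, t in reversed(list(enumerate(ts))): first[t] = i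
  let first : PySem.Dict String Int :=
    (PySem.List.enumerate ts).reverse.foldl
      (fun pos (p : Int × String) => pos.insert p.2 p.1) PySem.Dict.empty
  -- added = [t for t, _ in sorted(first.items(), key=lambda kv: kv[1])]
  -- (the base/enumerate loop at the end only mutates vocab; return added)
  (PySem.List.sorted first.items (fun kv => kv.2) false).map (fun kv => kv.1)

-- ===== PRECONDITION & SPEC =====
def Spec_extend_vocab_py (vocab : List (String × Int)) (tokens : List String) (out : List String) : Prop := out = extend_vocab_py_alt vocab tokens
instance (vocab : List (String × Int)) (tokens : List String) (out : List String) : Decidable (Spec_extend_vocab_py vocab tokens out) := by unfold Spec_extend_vocab_py; infer_instance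

-- ===== CLAIM =====
def Claim_equal_extend_vocab_py : Prop := ∀ (vocab : List (String × Int)) (tokens : List String), Dom_extend_vocab_py vocab tokens → Spec_extend_vocab_py vocab tokens (extend_vocab_py vocab tokens)

-- ===== LEMMAS AND PROOFS =====

-- Set.discard is a filter (definitionally)
theorem pv_discard_eq_filter (s : PySem.Set String) (t : String) :
    s.discard t = s.filter (fun y => !(y == t)) := rfl

-- ofList commutes with filter
theorem pv_ofList_filter (p : String → Bool) (l : List String) :
    (PySem.Set.ofList l).filter p = PySem.Set.ofList (l.filter p) := by
  induction l with
  | nil => rfl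
  | cons x xs ih =>
    by_cases h : p x = true
    · rw [PySem.Set.ofList_cons, List.filter_cons_of_pos h, List.filter_cons_of_pos h,
        PySem.Set.ofList_cons]
      congr 1
      rw [← ih]
      simp only [PySem.Set.discard, List.filter_filter]
      apply List.filter_congr
      intro a _
      exact Bool.and_comm _ _
    · have h' : p x = false := by simpa using h
      rw [PySem.Set.ofList_cons, List.filter_cons_of_neg h, List.filter_cons_of_neg h]
      rw [← ih]
      simp only [PySem.Set.discard, List.filter_filter]
      apply List.filter_congr
      intro a _
      by_cases hax : a = x
      · subst hax; simp [h']
      · simp [hax]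

-- A's loop returns the ordered first occurrences of the tokens missing from d
theorem pv_loop (ts : List String) :
    ∀ (d : PySem.Dict String Int) (nid : Int) (acc : List String),
      (ts.foldl
        (fun (st : PySem.Dict String Int × Int × List String) token =>
          if st.1.contains token then st
          else (st.1.insert token st.2.1, st.2.1 + 1, st.2.2 ++ [token]))
        (d, nid, acc)).2.2
      = acc ++ PySem.Set.ofList (ts.filter (fun t => !(d.contains t))) := by
  induction ts with
  | nil => intro d nid acc; simp [PySem.Set.ofList]
  | cons t ts ih =>
    intro d nid acc
    by_cases h : d.contains t
    · simp only [List.foldl, h, if_true, List.filter, Bool.not_true]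
      exact ih d nid acc
    · have h' : d.contains t = false := by simpa using h
      simp only [List.foldl, h', Bool.false_eq_true, if_false, List.filter, Bool.not_false]
      rw [ih]
      rw [PySem.Set.ofList_cons, pv_discard_eq_filter, pv_ofList_filter]
      have hf : (ts.filter (fun x => !((d.insert t nid).contains x)))
          = (ts.filter (fun x => !(d.contains x))).filter (fun y => !(y == t)) := by
        rw [List.filter_filter]
        apply List.filter_congr
        intro x _
        rw [PySem.Dict.contains_insert]
        cases hx : x == t <;> cases hd : d.contains x <;> simp_all
      rw [hf]
      simp

-- abbreviation used only in the proofs: B's backward overwrite fold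
def pvFirst (xs : List String) (s : Int) : PySem.Dict String Int :=
  (PySem.List.enumerate xs s).reverse.foldl
    (fun pos (p : Int × String) => pos.insert p.2 p.1) PySem.Dict.empty

-- the backward overwrite keeps, for each token, its FIRST index
theorem pv_first_get?_mem (xs : List String) :
    ∀ (s : Int) (t : String), t ∈ xs →
      (pvFirst xs s).get? t = some (s + (xs.idxOf t : Int)) := by
  induction xs with
  | nil => intro s t h; cases h
  | cons x xs ih =>
    intro s t ht
    have hstep : pvFirst (x :: xs) s = (pvFirst xs (s + 1)).insert x s := by
      unfold pvFirst
      rw [PySem.List.enumerate_cons, List.reverse_cons, List.foldl_append]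
      rfl
    rw [hstep, PySem.Dict.get?_insert]
    by_cases hx : t = x
    · subst hx; simp [List.idxOf_cons_self]
    · have ht' : t ∈ xs := by
        rcases List.mem_cons.mp ht with h | h
        · exact absurd h hx
        · exact h
      rw [if_neg hx, ih (s + 1) t ht']
      have : (x :: xs).idxOf t = xs.idxOf t + 1 := by
        simp [Ne.symm hx]
      rw [this]
      congr 1
      push_cast
      ring

-- the keys of the backward fold are the distinct tokens (in some order)
theorem pv_first_keys (xs : List String) (s : Int) :
    (pvFirst xs s).keys = PySem.Set.ofList ((PySem.List.enumerate xs s).reverse.map (fun p => p.2)) := by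
  unfold pvFirst
  rw [PySem.Dict.keys_foldl_insert_key]
  simp [PySem.Set.update_nil_left, PySem.Dict.keys_empty]

theorem pv_first_keys_nodup (xs : List String) (s : Int) : (pvFirst xs s).keys.Nodup := by
  rw [pv_first_keys]; exact PySem.Set.nodup_ofList _

theorem pv_mem_first_keys (xs : List String) (s : Int) (t : String) :
    t ∈ (pvFirst xs s).keys ↔ t ∈ xs := by
  rw [pv_first_keys, PySem.Set.mem_ofList]
  simp [List.mem_reverse]

-- ofList lists first occurrences in strictly increasing index order
theorem pv_ofList_pairwise_idx (xs : List String) :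
    (PySem.Set.ofList xs).Pairwise (fun a b => xs.idxOf a < xs.idxOf b) := by
  induction xs with
  | nil => simp [PySem.Set.ofList]
  | cons x xs ih =>
    rw [PySem.Set.ofList_cons]
    constructor
    · intro b hb
      have hbne : b ≠ x := ((PySem.Set.mem_discard _ _ _).mp hb).2
      rw [List.idxOf_cons_self]
      simp [Ne.symm hbne]
    · have hsub : (PySem.Set.discard (PySem.Set.ofList xs) x).Sublist (PySem.Set.ofList xs) := by
        rw [pv_discard_eq_filter]; exact List.filter_sublist
      have hp := (ih.sublist hsub)
      refine hp.imp_of_mem ?_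
      intro a b ha hb hlt
      have hane : a ≠ x := ((PySem.Set.mem_discard _ _ _).mp ha).2
      have hbne : b ≠ x := ((PySem.Set.mem_discard _ _ _).mp hb).2
      simp [Ne.symm hane, Ne.symm hbne]
      omega

-- B's sorted-items pass reconstructs ofList
theorem pv_alt_core (xs : List String) :
    (PySem.List.sorted (pvFirst xs 0).items (fun kv => kv.2) false).map (fun kv => kv.1)
      = PySem.Set.ofList xs := by
  have hnd := pv_first_keys_nodup xs 0
  have hitems : (pvFirst xs 0).items
      = (pvFirst xs 0).keys.map (fun t => (t, (xs.idxOf t : Int))) := by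
    rw [PySem.Dict.items_eq_map_keys _ hnd 0]
    apply List.map_congr_left
    intro t htk
    have ht : t ∈ xs := (pv_mem_first_keys xs 0 t).mp htk
    have := pv_first_get?_mem xs 0 t ht
    rw [PySem.Dict.getD_eq_get?_getD, this]
    simp
  have hperm : ((PySem.Set.ofList xs).map (fun t => (t, (xs.idxOf t : Int)))).Perm
      ((pvFirst xs 0).items) := by
    rw [hitems]
    apply List.Perm.map
    rw [List.perm_ext_iff_of_nodup (PySem.Set.nodup_ofList _) hnd]
    intro t
    rw [PySem.Set.mem_ofList, pv_mem_first_keys]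
  have hpw : ((PySem.Set.ofList xs).map (fun t => (t, (xs.idxOf t : Int)))).Pairwise
      (fun a b => a.2 < b.2) :=
    List.Pairwise.map _ (fun a b h => by simpa using h) (pv_ofList_pairwise_idx xs)
  have hs := PySem.List.sorted_eq_of_perm_of_pairwise_lt _ _ (fun kv => kv.2) hperm hpw
  rw [hs, List.map_map]
  exact List.map_id _

-- ===== VERDICT =====
theorem extend_vocab_py_spec : Claim_equal_extend_vocab_py := by
  intro vocab tokens _
  show extend_vocab_py vocab tokens = extend_vocab_py_alt vocab tokens
  unfold extend_vocab_py extend_vocab_py_alt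
  rw [pv_loop]
  show [] ++ PySem.Set.ofList (tokens.filter (fun t => !((PySem.Dict.mk vocab).contains t)))
      = (PySem.List.sorted (pvFirst (tokens.filter (fun t => !((PySem.Dict.mk vocab).contains t))) 0).items (fun kv => kv.2) false).map (fun kv => kv.1)
  rw [pv_alt_core]
  simp
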